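-- pv_equiv track=rewrite | github.com/brjohnson61/cs8 | cs8/cs8/lab4/functions_lab4.py | stringToPermutation
-- ===== SOURCE A (Python) =====
-- def stringToPermutation(s):
--     caps="ABCDEFGHIJKLMNOPQRSTUVWXYZ"
--     acc=''
--     for ch in s:
--         a=0
--         for c in s:
--             if c<ch:
--                 a=a+1
--         acc=acc+str(a+1)
--     return(acc)
-- ===== SOURCE B (Python) =====
-- def stringToPermutation(s):
--     counts = {}
--     for ch in s:
--         counts[ch] = counts.get(ch, 0) + 1
--     rank = {}
--     total = 0
--     for c in sorted(counts):
--         rank[c] = total + 1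
--         total += counts[c]
--     return ''.join(str(rank[ch]) for ch in s)
-- ===== Notes on version B (the rewrite author's own statement) =====
-- stated objective: faster
-- what changed: Replaces the quadratic per-character inner scan by a frequency table plus prefix sums over the sorted distinct characters, giving each character's rank in one pass.
import Mathlib
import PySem

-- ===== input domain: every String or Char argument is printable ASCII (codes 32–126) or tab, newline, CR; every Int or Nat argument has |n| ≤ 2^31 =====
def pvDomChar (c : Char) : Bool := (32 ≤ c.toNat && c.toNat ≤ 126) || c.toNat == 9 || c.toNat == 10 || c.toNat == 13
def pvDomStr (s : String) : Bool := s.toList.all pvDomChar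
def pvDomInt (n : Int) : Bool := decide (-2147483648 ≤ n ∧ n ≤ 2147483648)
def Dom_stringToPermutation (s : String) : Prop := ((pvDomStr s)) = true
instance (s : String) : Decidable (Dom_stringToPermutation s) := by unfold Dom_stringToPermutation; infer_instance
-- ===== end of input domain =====

-- B replaces A's quadratic per-character inner scan by a frequency table plus
-- prefix sums over the sorted distinct characters (objective: faster, O(n log n)).

-- ===== PORT A =====
-- for each ch in s: count c in s with c < ch, append str(count+1)
def stringToPermutation (s : String) : String :=
  String.ofList
    (s.toList.foldl
      (fun acc ch =>
        acc ++ PySem.Int.toChars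
          ((s.toList.foldl (fun a c => if c < ch then a + 1 else a) (0 : Int)) + 1))
      [])

-- ===== PORT B =====
-- counts[ch] = counts.get(ch, 0) + 1 over s; then ranks by prefix sums over sorted(counts);
-- then ''.join(str(rank[ch]) for ch in s)
def stringToPermutation_alt (s : String) : String :=
  let cs := s.toList
  let counts : PySem.Dict Char Int :=
    cs.foldl (fun d ch => d.insert ch (d.getD ch 0 + 1)) PySem.Dict.empty
  let rt : PySem.Dict Char Int × Int :=
    (PySem.List.sorted counts.keys (fun x => x) false).foldl
      (fun st c => (st.1.insert c (st.2 + 1), st.2 + counts.getD c 0))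
      (PySem.Dict.empty, 0)
  String.ofList (cs.flatMap (fun ch => PySem.Int.toChars (rt.1.getD ch 0)))

-- ===== PRECONDITION & SPEC =====
def Spec_stringToPermutation (s : String) (out : String) : Prop := out = stringToPermutation_alt s
instance (s : String) (out : String) : Decidable (Spec_stringToPermutation s out) := by unfold Spec_stringToPermutation; infer_instance

-- ===== CLAIM (what is proved, stated in full; the proofs are below) =====
def Claim_equal_stringToPermutation : Prop := ∀ (s : String), Dom_stringToPermutation s → Spec_stringToPermutation s (stringToPermutation s)

-- ===== LEMMAS AND PROOFS =====

-- A's inner loop counts the characters below ch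
theorem inner_count (ch : Char) (cs : List Char) (a : Int) :
    cs.foldl (fun a c => if c < ch then a + 1 else a) a
      = a + ((cs.filter (fun c => decide (c < ch))).length : Int) := by
  induction cs generalizing a with
  | nil => simp
  | cons c cs ih =>
    simp only [List.foldl_cons, List.filter_cons, ih]
    by_cases h : c < ch
    · simp [h]; ring
    · simp [h]

-- the rank-building fold leaves untouched keys alone
theorem rank_fold_not_mem (counts : PySem.Dict Char Int) (ks : List Char)
    (r : PySem.Dict Char Int) (t : Int) (c : Char) (hc : c ∉ ks) :
    (ks.foldl (fun st k => (st.1.insert k (st.2 + 1), st.2 + counts.getD k 0)) (r, t)).1.getD c 0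
      = r.getD c 0 := by
  induction ks generalizing r t with
  | nil => rfl
  | cons k ks ih =>
    simp only [List.mem_cons, not_or] at hc
    simp only [List.foldl_cons]
    rw [ih _ _ hc.2, PySem.Dict.getD_insert]
    simp [hc.1]

-- the rank-building fold: rank of c = t0 + 1 + the counts of all earlier (smaller) keys
theorem rank_fold_mem (counts : PySem.Dict Char Int) (ks : List Char)
    (hks : ks.Pairwise (· < ·)) (r : PySem.Dict Char Int) (t : Int) (c : Char) (hc : c ∈ ks) :
    (ks.foldl (fun st k => (st.1.insert k (st.2 + 1), st.2 + counts.getD k 0)) (r, t)).1.getD c 0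
      = t + 1 + (((ks.filter (fun k => decide (k < c))).map (fun k => counts.getD k 0)).sum) := by
  induction ks generalizing r t with
  | nil => cases hc
  | cons k ks ih =>
    rw [List.pairwise_cons] at hks
    simp only [List.foldl_cons]
    rcases List.mem_cons.mp hc with rfl | hmem
    · have hnot : c ∉ ks := fun h => lt_irrefl c (hks.1 c h)
      rw [rank_fold_not_mem counts ks _ _ c hnot, PySem.Dict.getD_insert]
      have hfilter : (c :: ks).filter (fun k => decide (k < c)) = [] := by
        rw [List.filter_eq_nil_iff]
        intro x hx
        rcases List.mem_cons.mp hx with rfl | hx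
        · simp
        · simp [not_lt.mpr (le_of_lt (hks.1 x hx))]
      simp [hfilter]
    · rw [ih hks.2 _ _ hmem]
      have hklt : k < c := hks.1 c hmem
      have hfilter : (k :: ks).filter (fun x => decide (x < c))
          = k :: ks.filter (fun x => decide (x < c)) := by simp [hklt]
      rw [hfilter]
      simp only [List.map_cons, List.sum_cons]
      ring

-- summing an indicator over distinct keys
theorem sum_indicator (c : Char) (p : Char → Bool) (ks : List Char) (hnd : ks.Nodup)
    (hc : c ∈ ks) :
    ((ks.filter p).map (fun k => if k = c then (1 : Int) else 0)).sum
      = if p c then 1 else 0 := by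
  induction ks with
  | nil => cases hc
  | cons k ks ihk =>
    have hndk := List.nodup_cons.mp hnd
    rcases List.mem_cons.mp hc with rfl | hck
    · have hz : ((ks.filter p).map (fun x => if x = c then (1 : Int) else 0)).sum = 0 := by
        apply List.sum_eq_zero
        intro y hy
        rcases List.mem_map.mp hy with ⟨x, hx, rfl⟩
        have hxc : x ≠ c := fun h => hndk.1 (h ▸ (List.mem_filter.mp hx).1)
        simp [hxc]
      by_cases hp : p c
      · simp [hp, hz]
      · simp [hp, hz]
    · have hrec := ihk hndk.2 hck
      have hkc : k ≠ c := fun h => hndk.1 (h ▸ hck)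
      by_cases hp : p k
      · simp [hp, hkc, hrec]
      · simp [hp, hrec]

-- summing the multiplicities of the distinct keys satisfying p counts the elements satisfying p
theorem sum_count_filter (cs : List Char) (p : Char → Bool) (ks : List Char) (hnd : ks.Nodup)
    (hmem : ∀ x ∈ cs, x ∈ ks) :
    (((ks.filter p).map (fun k => (cs.count k : Int))).sum)
      = ((cs.filter p).length : Int) := by
  induction cs with
  | nil => simp
  | cons c cs ih =>
    have hmem' : ∀ x ∈ cs, x ∈ ks := fun x hx => hmem x (List.mem_cons_of_mem c hx)
    have hc : c ∈ ks := hmem c List.mem_cons_self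
    have hcount : ∀ k, ((c :: cs).count k : Int)
        = (cs.count k : Int) + (if k = c then 1 else 0) := by
      intro k
      by_cases h : k = c
      · subst h; simp
      · simp [h, Ne.symm h]
    have hsplit :
        (((ks.filter p).map (fun k => ((c :: cs).count k : Int))).sum)
          = (((ks.filter p).map (fun k => (cs.count k : Int))).sum)
            + (((ks.filter p).map (fun k => if k = c then (1 : Int) else 0)).sum) := by
      rw [← List.sum_map_add]
      exact congrArg List.sum (List.map_congr_left (fun k _ => hcount k))
    rw [hsplit, ih hmem', sum_indicator c p ks hnd hc]
    by_cases hp : p c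
    · simp [hp]
    · simp [hp]

theorem flatMap_congr_mem {α β : Type} (l : List α) (f g : α → List β)
    (h : ∀ x ∈ l, f x = g x) : l.flatMap f = l.flatMap g := by
  induction l with
  | nil => rfl
  | cons x l ih =>
    simp only [List.flatMap_cons]
    rw [h x List.mem_cons_self, ih (fun y hy => h y (List.mem_cons_of_mem x hy))]

-- B's rank of a character of s is 1 + #{characters of s below it}
theorem rank_getD (cs : List Char) (ch : Char) (hch : ch ∈ cs)
    (counts : PySem.Dict Char Int) (hc : counts = PySem.Dict.counter cs) :
    ((PySem.List.sorted counts.keys (fun x => x) false).foldl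
        (fun st c => (st.1.insert c (st.2 + 1), st.2 + counts.getD c 0))
        (PySem.Dict.empty, 0)).1.getD ch 0
      = ((cs.filter (fun c => decide (c < ch))).length : Int) + 1 := by
  subst hc
  have hkeys : (PySem.Dict.counter cs).keys = PySem.Set.ofList cs := PySem.Dict.keys_counter cs
  have hpw : (PySem.List.sorted (PySem.Dict.counter cs).keys (fun x => x) false).Pairwise (· < ·) := by
    rw [hkeys]; exact PySem.List.sorted_ofList_pairwise_lt cs
  have hperm := PySem.List.sorted_perm (PySem.Dict.counter cs).keys (fun x : Char => x) false
  have hmemks : ∀ x, x ∈ PySem.List.sorted (PySem.Dict.counter cs).keys (fun x => x) false ↔ x ∈ cs := by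
    intro x
    rw [hperm.mem_iff, hkeys, PySem.Set.mem_ofList]
  have hnd : (PySem.List.sorted (PySem.Dict.counter cs).keys (fun x => x) false).Nodup :=
    hpw.imp (fun h => ne_of_lt h)
  rw [rank_fold_mem (PySem.Dict.counter cs) _ hpw _ _ ch ((hmemks ch).mpr hch)]
  have hmapeq : ∀ zs : List Char, zs.map (fun k => (PySem.Dict.counter cs).getD k 0)
      = zs.map (fun k => (cs.count k : Int)) := by
    intro zs
    exact List.map_congr_left (fun k _ => PySem.Dict.getD_counter cs k)
  rw [hmapeq, sum_count_filter cs _ _ hnd (fun x hx => (hmemks x).mpr hx)]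
  ring

-- ===== VERDICT (by name: the statement is the Claim_ definition above) =====
theorem stringToPermutation_spec : Claim_equal_stringToPermutation := by
  intro s _
  unfold Spec_stringToPermutation stringToPermutation stringToPermutation_alt
  simp only []
  congr 1
  rw [PySem.List.foldl_append_eq_flatMap, List.nil_append]
  apply flatMap_congr_mem
  intro ch hch
  rw [inner_count ch s.toList 0,
    rank_getD s.toList ch hch _ (PySem.Dict.foldl_insert_getD_add_one_eq_counter s.toList)]
  norm_num
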